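-- pv_equiv track=rewrite | github.com/cybertronai/sutro-problems | matmul/matmul.py | _matmul_test
-- ===== SOURCE A (Python) =====
-- def _matmul_test(n: int):
--     """Deterministic ``A``, ``B``, expected ``C = A @ B``.
--
--     Inputs convention (used by all scorers and baseline generators):
--     A flattened row-major first (``n²`` values), then B flattened
--     row-major (``n²`` values), so ``2 n²`` inputs total. Outputs:
--     C flattened row-major (``n²`` values).
--
--     The two formulas below produce distinct, **non-symmetric** test
--     data on purpose — earlier versions used ``B = A.T`` which made
--     ``C = A·B = A·A.T`` symmetric, allowing IRs that confused the
--     ``i, j`` indices to pass coincidentally. With the current data,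
--     ``C[i,j] != C[j,i]`` for ``n ≥ 2``, and the 1×1 case has
--     ``A = [[1]], B = [[3]], C = [[3]]`` so an identity-IR returning
--     ``A[0][0]`` no longer passes ``score_1x1``.
--     """
--     A = [[i * n + j + 1 for j in range(n)] for i in range(n)]
--     B = [[i + 2 * j + 3 for j in range(n)] for i in range(n)]
--     C = [[sum(A[i][k] * B[k][j] for k in range(n)) for j in range(n)]
--          for i in range(n)]
--     inputs = ([A[i][j] for i in range(n) for j in range(n)] +
--               [B[i][j] for i in range(n) for j in range(n)])
--     expected = [C[i][j] for i in range(n) for j in range(n)]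
--     return inputs, expected
-- ===== SOURCE B (Python) =====
-- def _matmul_test(n: int):
--     """Same data as A, but C computed by closed-form O(1) per entry (O(n^2) total)."""
--     if n <= 0:
--         return [], []
--     s1 = n * (n - 1) // 2                      # sum_{k<n} k
--     s2 = (n - 1) * n * (2 * n - 1) // 6        # sum_{k<n} k^2
--     inputs = list(range(1, n * n + 1)) + [i + 2 * j + 3 for i in range(n) for j in range(n)]
--     expected = [i * n * (s1 + (2 * j + 3) * n) + s2 + (2 * j + 4) * s1 + (2 * j + 3) * n
--                 for i in range(n) for j in range(n)]
--     return inputs, expected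
-- ===== Notes on version B (the rewrite author's own statement) =====
-- stated objective: faster
-- what changed: Replaces the O(n^3) triple-loop dot products for C with O(1) closed-form formulas per entry (arithmetic-series sums over k), and emits A's flattening directly as range(1, n*n+1).
import Mathlib
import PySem

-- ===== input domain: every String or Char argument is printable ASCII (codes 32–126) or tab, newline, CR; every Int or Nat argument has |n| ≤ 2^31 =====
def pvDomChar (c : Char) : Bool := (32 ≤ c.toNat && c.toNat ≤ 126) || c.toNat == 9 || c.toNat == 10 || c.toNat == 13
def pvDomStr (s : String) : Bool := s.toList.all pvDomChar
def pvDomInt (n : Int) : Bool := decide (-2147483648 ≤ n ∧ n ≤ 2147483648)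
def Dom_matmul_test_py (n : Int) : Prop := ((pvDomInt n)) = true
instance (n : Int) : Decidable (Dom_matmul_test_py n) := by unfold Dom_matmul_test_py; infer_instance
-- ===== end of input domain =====

-- B replaces A's O(n^3) triple loop for C with an O(1) closed-form formula per entry
-- (arithmetic-series sums over k), O(n^2) total; same return value on every input.

-- ===== PORT A =====
-- matrix A = [[i*n+j+1 for j in range(n)] for i in range(n)]
def pyMatA (n : Int) : List (List Int) :=
  (PySem.List.pyRange 0 n 1).map (fun i => (PySem.List.pyRange 0 n 1).map (fun j => i * n + j + 1))
-- matrix B = [[i+2*j+3 for j in range(n)] for i in range(n)]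
def pyMatB (n : Int) : List (List Int) :=
  (PySem.List.pyRange 0 n 1).map (fun i => (PySem.List.pyRange 0 n 1).map (fun j => i + 2 * j + 3))
-- C[i][j] = sum(A[i][k]*B[k][j] for k in range(n)); every index is in range, so the
-- pyGetD defaults are never hit and this matches Python's (raising) indexing exactly.
def pyMatC (n : Int) (mA mB : List (List Int)) : List (List Int) :=
  (PySem.List.pyRange 0 n 1).map (fun i => (PySem.List.pyRange 0 n 1).map (fun j =>
    ((PySem.List.pyRange 0 n 1).map (fun k =>
      PySem.List.pyGetD (PySem.List.pyGetD mA i []) k 0 *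
      PySem.List.pyGetD (PySem.List.pyGetD mB k []) j 0)).sum))

-- A, B, C are computed once (Python locals), then flattened
def matmul_test_py (n : Int) : List Int × List Int :=
  let mA := pyMatA n
  let mB := pyMatB n
  let mC := pyMatC n mA mB
  ((PySem.List.pyRange 0 n 1).flatMap (fun i => (PySem.List.pyRange 0 n 1).map (fun j =>
      PySem.List.pyGetD (PySem.List.pyGetD mA i []) j 0)) ++
   (PySem.List.pyRange 0 n 1).flatMap (fun i => (PySem.List.pyRange 0 n 1).map (fun j =>
      PySem.List.pyGetD (PySem.List.pyGetD mB i []) j 0)),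
   (PySem.List.pyRange 0 n 1).flatMap (fun i => (PySem.List.pyRange 0 n 1).map (fun j =>
      PySem.List.pyGetD (PySem.List.pyGetD mC i []) j 0)))

-- ===== PORT B =====
-- s1 = n*(n-1)//2  (= sum of k over range(n)),  s2 = (n-1)*n*(2*n-1)//6  (= sum of k^2)
def altS1 (n : Int) : Int := PySem.Int.floordiv (n * (n - 1)) 2
def altS2 (n : Int) : Int := PySem.Int.floordiv ((n - 1) * n * (2 * n - 1)) 6

def matmul_test_py_alt (n : Int) : List Int × List Int :=
  if n ≤ 0 then ([], [])
  else
    (PySem.List.pyRange 1 (n * n + 1) 1 ++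
       (PySem.List.pyRange 0 n 1).flatMap (fun i =>
         (PySem.List.pyRange 0 n 1).map (fun j => i + 2 * j + 3)),
     (PySem.List.pyRange 0 n 1).flatMap (fun i =>
       (PySem.List.pyRange 0 n 1).map (fun j =>
         i * n * (altS1 n + (2 * j + 3) * n) + altS2 n + (2 * j + 4) * altS1 n + (2 * j + 3) * n)))

-- ===== PRECONDITION & SPEC =====
def Spec_matmul_test_py (n : Int) (out : List Int × List Int) : Prop := out = matmul_test_py_alt n
instance (n : Int) (out : List Int × List Int) : Decidable (Spec_matmul_test_py n out) := by unfold Spec_matmul_test_py; infer_instance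

-- ===== CLAIM (what is proved, stated in full; the proofs are below) =====
def Claim_equal_matmul_test_py : Prop := ∀ (n : Int), Dom_matmul_test_py n → Spec_matmul_test_py n (matmul_test_py n)

-- ===== LEMMAS AND PROOFS =====

lemma range_cast (m : Nat) : PySem.List.pyRange 0 (m:Int) 1 = (List.range m).map (fun (k : Nat) => (k:Int)) := by
  rw [PySem.List.pyRange_one]
  simp only [Int.sub_zero, Int.toNat_natCast, zero_add]

lemma matA_get (m a b : Nat) (ha : a < m) (hb : b < m) :
    PySem.List.pyGetD (PySem.List.pyGetD (pyMatA (m:Int)) (a:Int) []) (b:Int) 0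
      = (a:Int) * (m:Int) + (b:Int) + 1 := by
  unfold pyMatA
  rw [PySem.List.pyGetD_map_pyRange _ _ _ _ ha, PySem.List.pyGetD_map_pyRange _ _ _ _ hb]

lemma matB_get (m a b : Nat) (ha : a < m) (hb : b < m) :
    PySem.List.pyGetD (PySem.List.pyGetD (pyMatB (m:Int)) (a:Int) []) (b:Int) 0
      = (a:Int) + 2 * (b:Int) + 3 := by
  unfold pyMatB
  rw [PySem.List.pyGetD_map_pyRange _ _ _ _ ha, PySem.List.pyGetD_map_pyRange _ _ _ _ hb]

lemma matC_get (m a b : Nat) (ha : a < m) (hb : b < m) :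
    PySem.List.pyGetD (PySem.List.pyGetD (pyMatC (m:Int) (pyMatA (m:Int)) (pyMatB (m:Int))) (a:Int) []) (b:Int) 0
      = ((List.range m).map (fun (k : Nat) =>
          ((a:Int) * (m:Int) + (k:Int) + 1) * ((k:Int) + (2 * (b:Int) + 3)))).sum := by
  unfold pyMatC
  rw [PySem.List.pyGetD_map_pyRange _ _ _ _ ha, PySem.List.pyGetD_map_pyRange _ _ _ _ hb]
  rw [range_cast, List.map_map]
  refine congrArg List.sum (List.map_congr_left ?_)
  intro k hk
  rw [List.mem_range] at hk
  simp only [Function.comp]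
  rw [matA_get m a k ha hk, matB_get m k b hk hb]
  ring

-- 6 * (sum_{k<m} (a+k+1)(k+b)) in closed form
lemma sum_poly (m : Nat) (a b : Int) :
    6 * ((List.range m).map (fun (k : Nat) => (a + (k:Int) + 1) * ((k:Int) + b))).sum
      = 6 * (a + 1) * b * (m:Int) + 3 * (a + b + 1) * ((m:Int) * ((m:Int) - 1))
        + ((m:Int) - 1) * (m:Int) * (2 * (m:Int) - 1) := by
  induction m with
  | zero => simp
  | succ t ih =>
    rw [List.range_succ, List.map_append, List.sum_append]
    simp only [List.map_cons, List.map_nil, List.sum_cons, List.sum_nil]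
    push_cast
    push_cast at ih
    linear_combination ih

lemma dvd6 (n : Int) : (6:Int) ∣ (n - 1) * n * (2 * n - 1) := by
  obtain ⟨q, r, hr0, hr6, hn⟩ : ∃ q r : Int, 0 ≤ r ∧ r < 6 ∧ n = 6 * q + r :=
    ⟨n / 6, n % 6, Int.emod_nonneg n (by norm_num), Int.emod_lt_of_pos n (by norm_num),
     by rw [Int.mul_ediv_add_emod]⟩
  subst hn
  interval_cases r
  · exact ⟨q * (6 * q - 1) * (12 * q - 1), by ring⟩
  · exact ⟨q * (6 * q + 1) * (12 * q + 1), by ring⟩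
  · exact ⟨(6 * q + 1) * (3 * q + 1) * (4 * q + 1), by ring⟩
  · exact ⟨(3 * q + 1) * (2 * q + 1) * (12 * q + 5), by ring⟩
  · exact ⟨(2 * q + 1) * (3 * q + 2) * (12 * q + 7), by ring⟩
  · exact ⟨(3 * q + 2) * (6 * q + 5) * (4 * q + 3), by ring⟩

lemma dvd2 (n : Int) : (2:Int) ∣ n * (n - 1) := by
  rcases Int.even_or_odd n with h | h
  · exact Dvd.dvd.mul_right h.two_dvd _
  · obtain ⟨k, hk⟩ := h
    exact ⟨n * k, by rw [hk]; ring⟩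

lemma s1_eq (n : Int) : 2 * altS1 n = n * (n - 1) := by
  unfold altS1
  rw [PySem.Int.floordiv_eq_ediv_of_pos (by norm_num)]
  exact Int.mul_ediv_cancel' (dvd2 n)

lemma s2_eq (n : Int) : 6 * altS2 n = (n - 1) * n * (2 * n - 1) := by
  unfold altS2
  rw [PySem.Int.floordiv_eq_ediv_of_pos (by norm_num)]
  exact Int.mul_ediv_cancel' (dvd6 n)

-- the first n^2 inputs (A flattened row-major) are exactly 1..n^2
lemma blk (t m : Nat) :
    (List.range t).flatMap (fun (a : Nat) => (List.range m).map (fun (b : Nat) => ((a:Int) * (m:Int) + (b:Int) + 1)))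
      = (List.range (t * m)).map (fun (k : Nat) => 1 + (k:Int)) := by
  induction t with
  | zero => simp
  | succ t ih =>
    rw [List.range_succ, List.flatMap_append, ih, Nat.succ_mul, List.range_add,
        List.map_append, List.map_map]
    congr 1
    simp only [List.flatMap_cons, List.flatMap_nil, List.append_nil]
    refine List.map_congr_left ?_
    intro b hb
    simp only [Function.comp]
    push_cast
    ring

lemma expected_entry (m a b : Nat) (ha : a < m) (hb : b < m) :
    PySem.List.pyGetD (PySem.List.pyGetD (pyMatC (m:Int) (pyMatA (m:Int)) (pyMatB (m:Int))) (a:Int) []) (b:Int) 0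
      = (a:Int) * (m:Int) * (altS1 (m:Int) + (2 * (b:Int) + 3) * (m:Int)) + altS2 (m:Int)
        + (2 * (b:Int) + 4) * altS1 (m:Int) + (2 * (b:Int) + 3) * (m:Int) := by
  rw [matC_get m a b ha hb]
  have h6 := sum_poly m ((a:Int) * (m:Int)) (2 * (b:Int) + 3)
  have hs1 := s1_eq (m:Int)
  have hs2 := s2_eq (m:Int)
  refine Int.eq_of_mul_eq_mul_left (a := 6) (by norm_num) ?_
  linear_combination h6 - (3 * (a:Int) * (m:Int) + 3 * (2 * (b:Int) + 4)) * hs1 - hs2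

-- ===== VERDICT (by name: the statement is the Claim_ definition above) =====
theorem matmul_test_py_spec : Claim_equal_matmul_test_py := by
  intro n _
  unfold Spec_matmul_test_py
  by_cases hle : n ≤ 0
  · simp [matmul_test_py, matmul_test_py_alt, pyMatA, pyMatB, pyMatC,
          PySem.List.pyRange_one_eq_nil hle, hle]
  · have hpos : 0 < n := not_le.mp hle
    obtain ⟨m, rfl⟩ : ∃ m : Nat, n = (m:Int) :=
      ⟨n.toNat, (Int.toNat_of_nonneg hpos.le).symm⟩
    simp only [matmul_test_py, matmul_test_py_alt, if_neg hle]
    refine Prod.ext ?_ ?_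
    · -- inputs
      show _ ++ _ = _ ++ _
      congr 1
      · -- A flattened = range(1, n^2+1)
        rw [range_cast]
        simp only [List.flatMap_map, List.map_map]
        have hcg : ∀ a ∈ List.range m,
            (List.range m).map ((fun j =>
              PySem.List.pyGetD (PySem.List.pyGetD (pyMatA (m:Int)) (a:Int) []) j 0) ∘ (fun (k : Nat) => (k:Int)))
              = (List.range m).map (fun (b : Nat) => ((a:Int) * (m:Int) + (b:Int) + 1)) := by
          intro a ha
          rw [List.mem_range] at ha
          exact List.map_congr_left fun b hb => matA_get m a b ha (List.mem_range.mp hb)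
        rw [List.flatMap_congr hcg, blk]
        rw [PySem.List.pyRange_one]
        have h2 : ((m:Int) * (m:Int) + 1 - 1).toNat = m * m := by
          rw [add_sub_cancel_right]; exact_mod_cast Int.toNat_natCast (m * m)
        rw [h2]
      · -- B flattened
        rw [range_cast]
        simp only [List.flatMap_map, List.map_map]
        refine List.flatMap_congr ?_
        intro a ha
        rw [List.mem_range] at ha
        exact List.map_congr_left fun b hb =>
          (matB_get m a b ha (List.mem_range.mp hb))
    · -- expected
      show _ = _
      rw [range_cast]
      simp only [List.flatMap_map, List.map_map]
      refine List.flatMap_congr ?_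
      intro a ha
      rw [List.mem_range] at ha
      exact List.map_congr_left fun b hb => expected_entry m a b ha (List.mem_range.mp hb)
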